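-- pv_equiv track=rewrite | github.com/EnzoFmx/PREMIERE_NSI | 03_ECRITURE_D_UNE_VALEUR/03_CARACTERE/Correction.py | up_pour_Bob
-- ===== SOURCE A (Python) =====
-- def up_pour_Bob(chaine):
--     resultat_final = ''
--     for i in chaine :
--         if ord(i) < ord("z") and ord(i)>ord('a'):
--             resultat_final += chr(ord(i)-32)
--         else :
--             resultat_final += i
--     return resultat_final
-- ===== SOURCE B (Python) =====
-- _TABLE = {c: c - 32 for c in range(ord('a') + 1, ord('z'))}
--
-- def up_pour_Bob(chaine):
--     return chaine.translate(_TABLE)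
-- ===== Notes on version B (the rewrite author's own statement) =====
-- stated objective: idiomatic
-- what changed: Replaces the explicit character loop with string concatenation by a translation table (codepoints 98..121 -> minus 32) built once and applied with str.translate in a single library pass.
import Mathlib
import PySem

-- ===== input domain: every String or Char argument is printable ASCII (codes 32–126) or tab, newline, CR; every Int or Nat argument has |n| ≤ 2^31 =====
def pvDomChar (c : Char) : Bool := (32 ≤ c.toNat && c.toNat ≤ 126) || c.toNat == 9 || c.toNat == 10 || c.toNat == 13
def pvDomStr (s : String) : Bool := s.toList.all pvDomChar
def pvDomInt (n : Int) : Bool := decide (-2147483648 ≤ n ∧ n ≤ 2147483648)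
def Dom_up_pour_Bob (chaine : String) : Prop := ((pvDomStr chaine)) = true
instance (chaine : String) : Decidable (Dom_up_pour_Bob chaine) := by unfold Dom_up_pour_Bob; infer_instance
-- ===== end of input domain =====

-- B replaces A's per-character loop with string concatenation by a translation table built once and applied in one pass (idiomatic).

-- ===== PORT A =====
-- A: loop over the characters, appending either chr(ord(i)-32) or i to an accumulator string.
def up_pour_Bob (chaine : String) : String :=
  String.ofList (chaine.toList.foldl
    (fun resultat_final i =>
      if i.toNat < 122 ∧ i.toNat > 97 then
        resultat_final ++ [Char.ofNat (i.toNat - 32)]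
      else
        resultat_final ++ [i]) [])

-- ===== PORT B =====
-- B: the translation table {c : c - 32 for c in range(98, 122)} built once (dict in insertion order).
def pvTable_up_pour_Bob : PySem.Dict Int Int :=
  (PySem.List.pyRange 98 122 1).foldl (fun d c => d.insert c (c - 32)) PySem.Dict.empty

-- str.translate: each character is replaced by its table entry (by codepoint), or kept if absent.
def up_pour_Bob_alt (chaine : String) : String :=
  String.ofList (chaine.toList.map (fun c =>
    match pvTable_up_pour_Bob.get? (c.toNat : Int) with
    | some v => Char.ofNat v.toNat
    | none => c))

-- ===== PRECONDITION & SPEC =====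
def Spec_up_pour_Bob (chaine : String) (out : String) : Prop := out = up_pour_Bob_alt chaine
instance (chaine : String) (out : String) : Decidable (Spec_up_pour_Bob chaine out) := by unfold Spec_up_pour_Bob; infer_instance

-- ===== CLAIM (what is proved, stated in full; the proofs are below) =====
def Claim_equal_up_pour_Bob : Prop := ∀ (chaine : String), Dom_up_pour_Bob chaine → Spec_up_pour_Bob chaine (up_pour_Bob chaine)

-- ===== LEMMAS AND PROOFS =====

-- The table lookup agrees with A's branch, for every codepoint the domain admits.
set_option maxRecDepth 4096 in
theorem pvTable_lookup (n : Nat) (h : n < 127) :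
    pvTable_up_pour_Bob.get? (n : Int) =
      if 97 < n ∧ n < 122 then some ((n : Int) - 32) else none := by
  revert h
  revert n
  decide

theorem pv_pointwise (c : Char) (h : pvDomChar c = true) :
    (match pvTable_up_pour_Bob.get? (c.toNat : Int) with
      | some v => Char.ofNat v.toNat
      | none => c) =
    (if c.toNat < 122 ∧ c.toNat > 97 then Char.ofNat (c.toNat - 32) else c) := by
  have hlt : c.toNat < 127 := by
    simp [pvDomChar] at h
    omega
  rw [pvTable_lookup c.toNat hlt]
  by_cases hc : 97 < c.toNat ∧ c.toNat < 122
  · have hn : ((c.toNat : Int) - 32).toNat = c.toNat - 32 := by omega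
    simp [hc, hn]
  · simp [hc]
    omega

theorem pv_foldl_append (g : Char → Char) (l : List Char) (acc : List Char) :
    l.foldl (fun s c => s ++ [g c]) acc = acc ++ l.map g := by
  induction l generalizing acc with
  | nil => simp
  | cons c cs ih => simp [List.foldl, ih (acc ++ [g c])]

-- ===== VERDICT (by name: the statement is the Claim_ definition above) =====
theorem up_pour_Bob_spec : Claim_equal_up_pour_Bob := by
  intro chaine hdom
  unfold Spec_up_pour_Bob up_pour_Bob up_pour_Bob_alt
  have hall : ∀ c ∈ chaine.toList, pvDomChar c = true := by
    simpa [Dom_up_pour_Bob, pvDomStr, List.all_eq_true] using hdom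
  have hfold : chaine.toList.foldl
      (fun resultat_final i =>
        if i.toNat < 122 ∧ i.toNat > 97 then
          resultat_final ++ [Char.ofNat (i.toNat - 32)]
        else
          resultat_final ++ [i]) [] =
      chaine.toList.foldl
        (fun s c => s ++ [if c.toNat < 122 ∧ c.toNat > 97 then Char.ofNat (c.toNat - 32) else c]) [] := by
    congr 1
    funext s c
    split_ifs <;> rfl
  rw [hfold, pv_foldl_append]
  congr 1
  apply List.map_congr_left
  intro c hc
  exact (pv_pointwise c (hall c hc)).symm
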